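-- pv_equiv track=rewrite | github.com/alexispurslane/atomicdatabase | AtomicDatabase/utils.py | create_text_entities
-- ===== SOURCE A (Python) =====
-- def create_text_entities(string):
--     new_str = ""
--     in_quot = False
--     entities = []
--     for c in string:
--         if c == "\"":
--             in_quot = not in_quot
--             if in_quot:
--                 entities.append("")
--             else:
--                 new_str += "ENTITY_" + str(len(entities) - 1)
--         else:
--             if in_quot:
--                 entities[-1] += c
--             else:
--                 new_str += c
--     return new_str.replace("{", " { ").\
--         replace("}", " } "), entities
-- ===== SOURCE B (Python) =====
-- def create_text_entities(string):
--     parts = string.split('"')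
--     last = len(parts) - 1
--     new_str = ""
--     entities = []
--     for i, part in enumerate(parts):
--         if i % 2 == 0:
--             new_str += part
--         else:
--             entities.append(part)
--             if i != last:
--                 new_str += "ENTITY_" + str(len(entities) - 1)
--     return new_str.replace("{", " { ").replace("}", " } "), entities
-- ===== Notes on version B (the rewrite author's own statement) =====
-- stated objective: faster
-- what changed: Replaced the char-by-char in_quot state machine with a split-on-quote pass over the segments: even segments go to the text, odd segments become entities (the ENTITY token is omitted for an unclosed trailing quote).
import Mathlib
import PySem

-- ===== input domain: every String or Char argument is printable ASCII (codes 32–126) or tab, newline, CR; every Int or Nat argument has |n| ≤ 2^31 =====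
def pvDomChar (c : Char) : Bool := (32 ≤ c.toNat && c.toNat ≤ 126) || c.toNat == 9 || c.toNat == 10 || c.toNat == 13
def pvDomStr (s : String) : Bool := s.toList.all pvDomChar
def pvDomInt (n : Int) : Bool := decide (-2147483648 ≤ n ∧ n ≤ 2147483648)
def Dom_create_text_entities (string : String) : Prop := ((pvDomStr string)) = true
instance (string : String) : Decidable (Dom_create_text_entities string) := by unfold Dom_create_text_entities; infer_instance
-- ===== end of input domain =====

-- B replaces A's char-by-char in_quot state machine with split('"') + one enumerate pass (objective: simpler).

-- ===== PORT A =====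
-- entities[-1] += c  (entities is nonempty whenever A executes this line)
def ctePushLast (ents : List (List Char)) (c : Char) : List (List Char) :=
  match ents with
  | [] => []
  | _ => ents.dropLast ++ [ents.getLast! ++ [c]]

-- the for-loop of A: state (new_str, in_quot, entities)
def cteLoopA : List Char → List Char → Bool → List (List Char) → List Char × List (List Char)
  | [], new, _, ents => (new, ents)
  | c :: cs, new, inq, ents =>
    if c = '"' then
      if !inq then
        cteLoopA cs new true (ents ++ [[]])
      else
        cteLoopA cs (new ++ "ENTITY_".toList ++ PySem.Int.toChars ((ents.length : Int) - 1)) false ents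
    else
      if inq then cteLoopA cs new inq (ctePushLast ents c)
      else cteLoopA cs (new ++ [c]) inq ents

def create_text_entities (string : String) : String × List String :=
  let r := cteLoopA string.toList [] false []
  (String.mk (PySem.Chars.replace (PySem.Chars.replace r.1 ['{'] " { ".toList) ['}'] " } ".toList),
   r.2.map String.mk)

-- ===== PORT B =====
-- string.split('"')  (exact port of Python str.split for the single-character separator '"')
def cteSplitQuote : List Char → List (List Char)
  | [] => [[]]
  | c :: cs =>
    if c = '"' then [] :: cteSplitQuote cs
    else
      match cteSplitQuote cs with
      | [] => [[c]]   -- unreachable: cteSplitQuote never returns []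
      | p :: ps => (c :: p) :: ps

-- the enumerate loop of B: state (new_str, entities)
def cteStepB (last : Int) (st : List Char × List (List Char)) (ip : Int × List Char) : List Char × List (List Char) :=
  if ip.1 % 2 = 0 then (st.1 ++ ip.2, st.2)
  else
    let ents := st.2 ++ [ip.2]
    if ip.1 ≠ last then
      (st.1 ++ "ENTITY_".toList ++ PySem.Int.toChars ((ents.length : Int) - 1), ents)
    else (st.1, ents)

def create_text_entities_alt (string : String) : String × List String :=
  let parts := cteSplitQuote string.toList
  let last : Int := (parts.length : Int) - 1
  let r := (PySem.List.enumerate parts 0).foldl (cteStepB last) ([], [])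
  (String.mk (PySem.Chars.replace (PySem.Chars.replace r.1 ['{'] " { ".toList) ['}'] " } ".toList),
   r.2.map String.mk)

-- ===== PRECONDITION & SPEC =====
def Spec_create_text_entities (string : String) (out : String × List String) : Prop := out = create_text_entities_alt string
instance (string : String) (out : String × List String) : Decidable (Spec_create_text_entities string out) := by unfold Spec_create_text_entities; infer_instance

-- ===== CLAIM (what is proved, stated in full; the proofs are below) =====
def Claim_equal_create_text_entities : Prop := ∀ (string : String), Dom_create_text_entities string → Spec_create_text_entities string (create_text_entities string)

-- ===== LEMMAS AND PROOFS =====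

-- common characterisation: process the split parts (even = text, odd = entity number k)
def cteG : List (List Char) → Nat → List Char × List (List Char)
  | [], _ => ([], [])
  | [p], _ => (p, [])
  | p :: q :: rest, k =>
    match rest with
    | [] => (p, [q])
    | _ =>
      let r := cteG rest (k + 1)
      (p ++ "ENTITY_".toList ++ PySem.Int.toChars (k : Int) ++ r.1, q :: r.2)

theorem cteSplitQuote_ne_nil (cs : List Char) : cteSplitQuote cs ≠ [] := by
  cases cs with
  | nil => simp [cteSplitQuote]
  | cons c cs =>
    simp only [cteSplitQuote]
    split
    · simp
    · split <;> simp

theorem cteG_cons_prepend (c : Char) (p : List Char) (ps : List (List Char)) (k : Nat) :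
    cteG ((c :: p) :: ps) k = (c :: (cteG (p :: ps) k).1, (cteG (p :: ps) k).2) := by
  match ps with
  | [] => simp [cteG]
  | q :: rest =>
    match rest with
    | [] => simp [cteG]
    | r :: rest' => simp [cteG]

theorem ctePushLast_append (ents : List (List Char)) (e : List Char) (c : Char) :
    ctePushLast (ents ++ [e]) c = ents ++ [e ++ [c]] := by
  simp [ctePushLast]

theorem loopA_quote_open (cs : List Char) (new : List Char) (ents : List (List Char)) :
    cteLoopA ('"' :: cs) new false ents = cteLoopA cs new true (ents ++ [[]]) := by
  simp [cteLoopA]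

theorem loopA_quote_close (cs : List Char) (new : List Char) (ents : List (List Char)) :
    cteLoopA ('"' :: cs) new true ents
      = cteLoopA cs (new ++ "ENTITY_".toList ++ PySem.Int.toChars ((ents.length : Int) - 1)) false ents := by
  simp [cteLoopA]

theorem loopA_char_out (c : Char) (cs : List Char) (new : List Char) (ents : List (List Char))
    (hc : ¬ c = '"') : cteLoopA (c :: cs) new false ents = cteLoopA cs (new ++ [c]) false ents := by
  simp [cteLoopA, hc]

theorem loopA_char_in (c : Char) (cs : List Char) (new : List Char) (ents : List (List Char))
    (hc : ¬ c = '"') : cteLoopA (c :: cs) new true ents = cteLoopA cs new true (ctePushLast ents c) := by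
  simp [cteLoopA, hc]

theorem sq_quote (cs : List Char) : cteSplitQuote ('"' :: cs) = [] :: cteSplitQuote cs := by
  simp [cteSplitQuote]

theorem sq_char (c : Char) (cs : List Char) (q : List Char) (rest : List (List Char))
    (hc : ¬ c = '"') (hsq : cteSplitQuote cs = q :: rest) :
    cteSplitQuote (c :: cs) = (c :: q) :: rest := by
  simp [cteSplitQuote, hc, hsq]

theorem cteLoopA_split (cs : List Char) : ∀ (new : List Char) (ents : List (List Char)),
    (cteLoopA cs new false ents =
      (new ++ (cteG (cteSplitQuote cs) ents.length).1, ents ++ (cteG (cteSplitQuote cs) ents.length).2))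
    ∧ (∀ e : List Char, cteLoopA cs new true (ents ++ [e]) =
      match cteSplitQuote cs with
      | [] => (new, ents)   -- unreachable
      | q :: rest =>
        match rest with
        | [] => (new, ents ++ [e ++ q])
        | _ :: _ =>
          (new ++ "ENTITY_".toList ++ PySem.Int.toChars (ents.length : Int) ++ (cteG rest (ents.length + 1)).1,
           (ents ++ [e ++ q]) ++ (cteG rest (ents.length + 1)).2)) := by
  induction cs with
  | nil =>
    intro new ents
    constructor
    · simp [cteLoopA, cteSplitQuote, cteG]
    · intro e; simp [cteLoopA, cteSplitQuote]
  | cons c cs ih =>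
    intro new ents
    obtain ⟨q, rest, hsq⟩ := List.exists_cons_of_ne_nil (cteSplitQuote_ne_nil cs)
    constructor
    · by_cases hc : c = '"'
      · subst hc
        have h2 := (ih new ents).2 []
        rw [hsq] at h2
        rw [loopA_quote_open, show (ents ++ [[]] : List (List Char)) = ents ++ [([] : List Char)] from rfl,
          h2, sq_quote, hsq]
        cases rest with
        | nil => simp [cteG]
        | cons r rest' => simp [cteG]
      · have h1 := (ih (new ++ [c]) ents).1
        rw [hsq] at h1
        rw [loopA_char_out c cs new ents hc, h1, sq_char c cs q rest hc hsq, cteG_cons_prepend]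
        simp
    · intro e
      by_cases hc : c = '"'
      · subst hc
        have h1 := (ih (new ++ "ENTITY_".toList ++ PySem.Int.toChars (ents.length : Int)) (ents ++ [e])).1
        rw [hsq] at h1
        rw [loopA_quote_close,
          show ((((ents ++ [e]).length : Int)) - 1) = (ents.length : Int) by simp,
          h1, sq_quote, hsq]
        simp [List.append_assoc]
      · have h2 := (ih new ents).2 (e ++ [c])
        rw [hsq] at h2
        rw [loopA_char_in c cs new (ents ++ [e]) hc, ctePushLast_append, h2,
          sq_char c cs q rest hc hsq]
        cases rest with
        | nil => simp
        | cons r rest' => simp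

theorem stepB_even (last : Int) (st : List Char × List (List Char)) (ip : Int × List Char)
    (h : ip.1 % 2 = 0) : cteStepB last st ip = (st.1 ++ ip.2, st.2) := by
  simp [cteStepB, h]

theorem stepB_odd_mid (last : Int) (st : List Char × List (List Char)) (ip : Int × List Char)
    (h : ¬ ip.1 % 2 = 0) (h2 : ip.1 ≠ last) :
    cteStepB last st ip
      = (st.1 ++ "ENTITY_".toList ++ PySem.Int.toChars (((st.2 ++ [ip.2]).length : Int) - 1),
         st.2 ++ [ip.2]) := by
  simp [cteStepB, h, h2]

theorem stepB_odd_last (last : Int) (st : List Char × List (List Char)) (ip : Int × List Char)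
    (h : ¬ ip.1 % 2 = 0) (h2 : ip.1 = last) :
    cteStepB last st ip = (st.1, st.2 ++ [ip.2]) := by
  simp [cteStepB, h2]
  omega

theorem cteFoldB (parts : List (List Char)) : ∀ (i : Nat) (t : List Char) (es : List (List Char)),
    (PySem.List.enumerate parts (2 * (i : Int))).foldl (cteStepB (2 * (i : Int) + (parts.length : Int) - 1)) (t, es)
      = (t ++ (cteG parts es.length).1, es ++ (cteG parts es.length).2) := by
  match parts with
  | [] =>
    intro i t es
    simp [PySem.List.enumerate, cteG]
  | [p] =>
    intro i t es
    simp only [PySem.List.enumerate_cons, PySem.List.enumerate_nil, List.foldl_cons, List.foldl_nil]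
    rw [stepB_even _ _ _ (by simp <;> omega)]
    simp [cteG]
  | p :: q :: rest =>
    intro i t es
    simp only [PySem.List.enumerate_cons, List.foldl_cons]
    rw [stepB_even _ (t, es) (2 * (i : Int), p) (by simp <;> omega)]
    cases rest with
    | nil =>
      rw [stepB_odd_last _ ((t, es).1 ++ (2 * (i : Int), p).2, (t, es).2) (2 * (i : Int) + 1, q)
        (by simp <;> omega) (by simp <;> omega)]
      simp [PySem.List.enumerate, cteG]
    | cons r rest' =>
      have ih := cteFoldB (r :: rest') (i + 1)
          (t ++ p ++ "ENTITY_".toList ++ PySem.Int.toChars ((es.length : Int))) (es ++ [q])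
      rw [stepB_odd_mid _ ((t, es).1 ++ (2 * (i : Int), p).2, (t, es).2) (2 * (i : Int) + 1, q)
        (by simp <;> omega) (by simp <;> push_cast <;> omega)]
      have hstart : 2 * (i : Int) + 1 + 1 = 2 * ((i : Int) + 1) := by omega
      have harg : 2 * (i : Int) + ((p :: q :: r :: rest').length : Int) - 1
          = 2 * ((i : Int) + 1) + (((r :: rest').length : Int)) - 1 := by simp <;> omega
      simp only [] at *
      rw [show ((((es ++ [q]).length : Int)) - 1) = ((es.length : Int)) by simp]
      rw [hstart, harg]
      push_cast at ih ⊢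
      rw [ih]
      simp only [cteG, List.length_append, List.length_cons]
      simp [List.append_assoc]

-- ===== VERDICT (by name: the statement is the Claim_ definition above) =====
theorem create_text_entities_spec : Claim_equal_create_text_entities := by
  intro string _
  unfold Spec_create_text_entities create_text_entities create_text_entities_alt
  have hA := (cteLoopA_split string.toList [] []).1
  have hB := cteFoldB (cteSplitQuote string.toList) 0 [] []
  simp only [Nat.cast_zero, mul_zero, zero_add, List.length_nil, List.nil_append] at hA hB
  simp only [hA, hB]
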